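-- pv_equiv track=rewrite | github.com/EddySetyan23/data-mining-project | 217240789-t1.py | apriori_frequent_pairs
-- ===== SOURCE A (Python) =====
-- from collections import Counter
-- from itertools import combinations
--
-- def apriori_frequent_pairs(transactions, min_support):
--     # Count individual items
--     item_counts = Counter(item for transaction in transactions for item in transaction)
--
--     # Filter items based on min_support
--     frequent_items = {item for item, count in item_counts.items() if count >= min_support}
--
--     # Find and count pairs
--     pair_counts = Counter()
--     for transaction in transactions:
--         frequent_transaction = [item for item in transaction if item in frequent_items]
--         for pair in combinations(frequent_transaction, 2):
--             pair_counts[pair] += 1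
--
--     # Filter pairs based on min_support
--     frequent_pairs = {pair for pair, count in pair_counts.items() if count >= min_support}
--
--     return frequent_pairs
-- ===== SOURCE B (Python) =====
-- from collections import Counter
-- from itertools import combinations, chain
--
-- def apriori_frequent_pairs(transactions, min_support):
--     # One counting pass over the raw transactions; Apriori pruning is applied
--     # in the final filter instead of by prefiltering each transaction.
--     item_counts = Counter(chain.from_iterable(transactions))
--     pair_counts = Counter(chain.from_iterable(combinations(t, 2) for t in transactions))
--     return {pair
--             for pair, count in pair_counts.items()
--             if count >= min_support
--             and item_counts[pair[0]] >= min_support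
--             and item_counts[pair[1]] >= min_support}
-- ===== Notes on version B (the rewrite author's own statement) =====
-- stated objective: simpler
-- what changed: B drops the frequent-item prefiltering of every transaction: it counts pairs in one pass over the raw transactions and applies the Apriori item-support pruning in the final filter instead.
import Mathlib
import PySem

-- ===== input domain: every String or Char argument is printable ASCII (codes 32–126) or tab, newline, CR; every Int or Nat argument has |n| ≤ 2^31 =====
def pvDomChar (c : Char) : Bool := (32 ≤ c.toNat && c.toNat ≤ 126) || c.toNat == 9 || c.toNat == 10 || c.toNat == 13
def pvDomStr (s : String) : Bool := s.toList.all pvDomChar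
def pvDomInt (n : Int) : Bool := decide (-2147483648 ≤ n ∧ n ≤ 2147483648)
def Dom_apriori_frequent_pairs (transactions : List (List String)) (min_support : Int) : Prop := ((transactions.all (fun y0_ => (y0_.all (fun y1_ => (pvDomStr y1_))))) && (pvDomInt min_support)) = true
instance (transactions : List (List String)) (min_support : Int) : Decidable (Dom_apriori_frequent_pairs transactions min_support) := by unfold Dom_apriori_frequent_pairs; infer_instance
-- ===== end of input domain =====

-- B replaces A's prefilter-each-transaction-then-count scheme by one counting pass over the
-- raw transactions, with the Apriori pruning moved into the final filter (same exact results).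

-- ===== PORT A =====
-- itertools.combinations(t, 2) as a list of tuples (String × String), in CPython's order
-- (exact: combinations(x::xs, 2) = [(x,y) for y in xs] ++ combinations(xs, 2)); used by both ports.
def pvPairs2 : List String → List (String × String)
  | [] => []
  | x :: xs => xs.map (fun y => (x, y)) ++ pvPairs2 xs

def apriori_frequent_pairs (transactions : List (List String)) (min_support : Int) : List (String × String) :=
  let itemCounts : PySem.Dict String Int := PySem.Dict.counter (transactions.flatMap (fun t => t))
  let frequentItems : PySem.Set String :=
    PySem.Set.ofList ((itemCounts.items.filter (fun kv => decide (min_support ≤ kv.2))).map Prod.fst)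
  let pairCounts : PySem.Dict (String × String) Int :=
    transactions.foldl (fun d transaction =>
      let frequentTransaction := transaction.filter (fun item => PySem.Set.contains frequentItems item)
      (pvPairs2 frequentTransaction).foldl (fun d p => d.modify p 0 (· + 1)) d) PySem.Dict.empty
  PySem.Set.ofList ((pairCounts.items.filter (fun kv => decide (min_support ≤ kv.2))).map Prod.fst)

-- ===== PORT B =====
def apriori_frequent_pairs_alt (transactions : List (List String)) (min_support : Int) : List (String × String) :=
  let itemCounts : PySem.Dict String Int := PySem.Dict.counter (transactions.flatMap (fun t => t))
  let pairCounts : PySem.Dict (String × String) Int :=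
    PySem.Dict.counter (transactions.flatMap (fun t => pvPairs2 t))
  PySem.Set.ofList ((pairCounts.items.filter (fun kv =>
      decide (min_support ≤ kv.2) && decide (min_support ≤ itemCounts.getD kv.1.1 0)
        && decide (min_support ≤ itemCounts.getD kv.1.2 0))).map Prod.fst)

-- ===== PRECONDITION & SPEC =====
def Spec_apriori_frequent_pairs (transactions : List (List String)) (min_support : Int) (out : List (String × String)) : Prop := out = apriori_frequent_pairs_alt transactions min_support
instance (transactions : List (List String)) (min_support : Int) (out : List (String × String)) : Decidable (Spec_apriori_frequent_pairs transactions min_support out) := by unfold Spec_apriori_frequent_pairs; infer_instance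

-- ===== CLAIM (what is proved, stated in full; the proofs are below) =====
def Claim_equal_apriori_frequent_pairs : Prop := ∀ (transactions : List (List String)) (min_support : Int), Dom_apriori_frequent_pairs transactions min_support → Spec_apriori_frequent_pairs transactions min_support (apriori_frequent_pairs transactions min_support)

-- ===== LEMMAS AND PROOFS =====

-- combinations-of-2 of a filtered list = the filtered combinations-of-2
theorem pv_pairs2_filter (q : String → Bool) (t : List String) :
    pvPairs2 (t.filter q) = (pvPairs2 t).filter (fun p => q p.1 && q p.2) := by
  induction t with
  | nil => rfl
  | cons x xs ih =>
    by_cases hx : q x = true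
    · simp only [List.filter_cons, hx, if_pos, pvPairs2, ih, List.filter_append, List.filter_map]
      congr 1
      simp [Function.comp_def, hx]
    · simp only [Bool.not_eq_true] at hx
      simp only [List.filter_cons, hx, Bool.false_eq_true, if_false, pvPairs2, ih,
        List.filter_append, List.filter_map]
      simp [Function.comp_def, hx]

-- set(xs) commutes with filtering
theorem pv_ofList_filter (q : String × String → Bool) (xs : List (String × String)) :
    PySem.Set.ofList (xs.filter q) = (PySem.Set.ofList xs).filter q := by
  induction xs using List.reverseRecOn with
  | nil => rfl
  | append_singleton xs x ih =>
    rw [List.filter_append, PySem.Set.ofList_append_singleton, PySem.Set.add_eq_ite]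
    by_cases hx : q x = true
    · simp only [List.filter_cons, hx, if_pos, List.filter_nil,
        PySem.Set.ofList_append_singleton, ih, PySem.Set.add_eq_ite]
      by_cases hmem : x ∈ PySem.Set.ofList xs
      · simp [hmem, List.mem_filter, hx]
      · simp [hmem, List.mem_filter, hx, List.filter_append]
    · simp only [Bool.not_eq_true] at hx
      simp only [List.filter_cons, hx, Bool.false_eq_true, if_false, List.filter_nil,
        List.append_nil, ih]
      by_cases hmem : x ∈ PySem.Set.ofList xs
      · simp [hmem]
      · simp [hmem, List.filter_append, hx]

-- components of a 2-combination are elements of the list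
theorem pv_mem_pairs2 (p : String × String) (t : List String) (h : p ∈ pvPairs2 t) :
    p.1 ∈ t ∧ p.2 ∈ t := by
  induction t with
  | nil => simp [pvPairs2] at h
  | cons x xs ih =>
    simp only [pvPairs2, List.mem_append, List.mem_map] at h
    rcases h with ⟨y, hy, rfl⟩ | h
    · simp [hy]
    · rcases ih h with ⟨h1, h2⟩
      exact ⟨List.mem_cons_of_mem _ h1, List.mem_cons_of_mem _ h2⟩

-- the frequent-items membership test equals the direct count test, for items that occur
theorem pv_contains_eq (L : List String) (s : Int) (x : String) (hx : x ∈ L) :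
    PySem.Set.contains (PySem.Set.ofList
        (((PySem.Dict.counter L).items.filter (fun kv => decide (s ≤ kv.2))).map Prod.fst)) x
      = decide (s ≤ (L.count x : Int)) := by
  rw [PySem.Dict.items_counter, List.filter_map, List.map_map]
  have hfst : (Prod.fst ∘ fun k => (k, (L.count k : Int))) = id := rfl
  rw [hfst, List.map_id]
  cases hq : decide (s ≤ (L.count x : Int)) with
  | true =>
    apply (PySem.Set.contains_iff _ _).mpr
    rw [PySem.Set.mem_ofList, List.mem_filter]
    refine ⟨(PySem.Set.mem_ofList _ _).mpr hx, ?_⟩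
    simpa [Function.comp_def] using hq
  | false =>
    apply Bool.eq_false_iff.mpr
    intro hc
    have hm := (PySem.Set.contains_iff _ _).mp hc
    rw [PySem.Set.mem_ofList, List.mem_filter] at hm
    have h2 := hm.2
    simp only [Function.comp_def] at h2
    rw [hq] at h2
    exact absurd h2 (by simp)

-- A's nested counting loop over prefiltered transactions = counter of the filtered pair stream
theorem pv_A_fold (transactions : List (List String)) (itemTest : String → Bool) :
    transactions.foldl (fun d transaction =>
        (pvPairs2 (transaction.filter itemTest)).foldl
          (fun (d : PySem.Dict (String × String) Int) p => d.modify p 0 (· + 1)) d)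
        PySem.Dict.empty
      = PySem.Dict.counter ((transactions.flatMap (fun t => pvPairs2 t)).filter
          (fun p => itemTest p.1 && itemTest p.2)) := by
  rw [← List.foldl_flatMap]
  have h1 : transactions.flatMap (fun t => pvPairs2 (t.filter itemTest))
      = transactions.flatMap (fun t => (pvPairs2 t).filter (fun p => itemTest p.1 && itemTest p.2)) := by
    simp only [pv_pairs2_filter]
  rw [h1, ← List.filter_flatMap, PySem.Dict.counter_eq_foldl]

-- items of the counter of a filtered stream, filtered by min support, projected to keys
theorem pv_A_items (s : Int) (PB : List (String × String)) (good : String × String → Bool) :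
    (((PySem.Dict.counter (PB.filter good)).items.filter
        (fun kv => decide (s ≤ kv.2))).map Prod.fst)
      = (PySem.Set.ofList PB).filter (fun k => decide (s ≤ (PB.count k : Int)) && good k) := by
  rw [PySem.Dict.items_counter, pv_ofList_filter]
  have h1 : ((PySem.Set.ofList PB).filter good).map (fun k => (k, ((PB.filter good).count k : Int)))
      = ((PySem.Set.ofList PB).filter good).map (fun k => (k, (PB.count k : Int))) := by
    apply List.map_congr_left
    intro k hk
    rw [List.count_filter (List.mem_filter.mp hk).2]
  rw [h1, List.filter_map, List.map_map]
  have hfst : (Prod.fst ∘ fun k => (k, (PB.count k : Int))) = id := rfl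
  rw [hfst, List.map_id, List.filter_filter]
  apply List.filter_congr
  intro k _
  simp

-- items of the counter of the raw stream, filtered by min support and a key test, projected
theorem pv_B_items (s : Int) (PB : List (String × String)) (q : String × String → Bool) :
    (((PySem.Dict.counter PB).items.filter
        (fun kv => decide (s ≤ kv.2) && q kv.1)).map Prod.fst)
      = (PySem.Set.ofList PB).filter (fun k => decide (s ≤ (PB.count k : Int)) && q k) := by
  rw [PySem.Dict.items_counter, List.filter_map, List.map_map]
  have hfst : (Prod.fst ∘ fun k => (k, (PB.count k : Int))) = id := rfl
  rw [hfst, List.map_id]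
  apply List.filter_congr
  intro k _
  simp

-- the whole equivalence
theorem pv_main (transactions : List (List String)) (s : Int) :
    apriori_frequent_pairs transactions s = apriori_frequent_pairs_alt transactions s := by
  unfold apriori_frequent_pairs apriori_frequent_pairs_alt
  dsimp only []
  rw [pv_A_fold]
  rw [pv_A_items]
  have hB : ∀ kv : (String × String) × Int,
      (decide (s ≤ kv.2) && decide (s ≤ (PySem.Dict.counter (transactions.flatMap (fun t => t))).getD kv.1.1 0)
        && decide (s ≤ (PySem.Dict.counter (transactions.flatMap (fun t => t))).getD kv.1.2 0))
      = (decide (s ≤ kv.2) &&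
          (decide (s ≤ ((transactions.flatMap (fun t => t)).count kv.1.1 : Int)) &&
           decide (s ≤ ((transactions.flatMap (fun t => t)).count kv.1.2 : Int)))) := by
    intro kv
    rw [PySem.Dict.getD_counter, PySem.Dict.getD_counter, Bool.and_assoc]
  simp only [hB]
  rw [pv_B_items s (transactions.flatMap (fun t => pvPairs2 t))
      (fun k => decide (s ≤ ((transactions.flatMap (fun t => t)).count k.1 : Int)) &&
                decide (s ≤ ((transactions.flatMap (fun t => t)).count k.2 : Int)))]
  congr 1
  apply List.filter_congr
  intro p hp
  have hpPB : p ∈ transactions.flatMap (fun t => pvPairs2 t) :=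
    (PySem.Set.mem_ofList _ _).mp hp
  obtain ⟨t, ht, hpt⟩ := List.mem_flatMap.mp hpPB
  obtain ⟨h1, h2⟩ := pv_mem_pairs2 p t hpt
  rw [pv_contains_eq _ s p.1 (List.mem_flatMap.mpr ⟨t, ht, h1⟩),
      pv_contains_eq _ s p.2 (List.mem_flatMap.mpr ⟨t, ht, h2⟩)]

-- ===== VERDICT (by name: the statement is the Claim_ definition above) =====
theorem apriori_frequent_pairs_spec : Claim_equal_apriori_frequent_pairs := by
  intro transactions min_support _
  unfold Spec_apriori_frequent_pairs
  exact pv_main transactions min_support
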